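-- pv_equiv track=rewrite | github.com/irmoralesb/Project-AgenticEbookLibrary | testing/EbookDataExtraction/toc.py | build_initial_stack_for_page_one
-- ===== SOURCE A (Python) =====
-- def apply_toc_to_stack(stack: list[tuple[int, str]], level: int, title: str) -> None:
--     while stack and stack[-1][0] >= level:
--         stack.pop()
--     stack.append((level, title))
--
-- def build_initial_stack_for_page_one(
--     events_by_page: dict[int, list[tuple[int, str]]],
--     page_count: int,
-- ) -> list[tuple[int, str]]:
--     """Apply any TOC entries on page 1 before processing."""
--     stack: list[tuple[int, str]] = []
--     for level, title in events_by_page.get(1, []):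
--         apply_toc_to_stack(stack, level, title)
--     return stack
-- ===== SOURCE B (Python) =====
-- def build_initial_stack_for_page_one(
--     events_by_page: dict[int, list[tuple[int, str]]],
--     page_count: int,
-- ) -> list[tuple[int, str]]:
--     """Right-to-left min scan: an entry survives iff no later entry has a level <= its own."""
--     survivors: list[tuple[int, str]] = []
--     min_so_far = None
--     for level, title in reversed(events_by_page.get(1, [])):
--         if min_so_far is None or level < min_so_far:
--             survivors.append((level, title))
--             min_so_far = level
--     survivors.reverse()
--     return survivors
-- ===== Notes on version B (the rewrite author's own statement) =====
-- stated objective: alternative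
-- what changed: Replaces the forward monotonic-stack simulation (push + pop-while-top>=level) with a single right-to-left scan keeping only the running strict minimum of levels, then one reverse.
import Mathlib
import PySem

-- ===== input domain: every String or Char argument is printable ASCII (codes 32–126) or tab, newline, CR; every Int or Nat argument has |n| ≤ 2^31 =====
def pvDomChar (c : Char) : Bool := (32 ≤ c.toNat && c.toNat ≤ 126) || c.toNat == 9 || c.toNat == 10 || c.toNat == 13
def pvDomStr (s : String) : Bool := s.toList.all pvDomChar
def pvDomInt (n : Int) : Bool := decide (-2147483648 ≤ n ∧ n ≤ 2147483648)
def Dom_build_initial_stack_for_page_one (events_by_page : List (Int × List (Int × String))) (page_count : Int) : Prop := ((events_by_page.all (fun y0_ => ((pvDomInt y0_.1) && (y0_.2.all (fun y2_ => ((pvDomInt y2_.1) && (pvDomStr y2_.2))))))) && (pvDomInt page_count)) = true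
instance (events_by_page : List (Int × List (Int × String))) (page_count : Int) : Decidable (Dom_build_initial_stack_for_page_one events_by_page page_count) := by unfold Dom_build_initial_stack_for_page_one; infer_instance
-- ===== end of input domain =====

-- B replaces A's forward monotonic-stack simulation (pop-while-top≥level, then push) by a single
-- right-to-left scan that keeps an entry iff its level is strictly below the running minimum of the
-- levels seen so far, then reverses; objective: alternative (same cost, different algorithm).

-- ===== PORT A =====
-- the 'while stack and stack[-1][0] >= level: stack.pop()' loop (top of stack = last element)
def pvWhilePop (s : List (Int × String)) (level : Int) : List (Int × String) :=
  match hs : s.getLast? with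
  | some top => if level ≤ top.1 then pvWhilePop s.dropLast level else s
  | none => s
termination_by s.length
decreasing_by
  have hne : s ≠ [] := by intro h; subst h; simp at hs
  have := List.length_pos_of_ne_nil hne
  simp only [List.length_dropLast]
  omega

def apply_toc_to_stack (stack : List (Int × String)) (level : Int) (title : String) : List (Int × String) :=
  pvWhilePop stack level ++ [(level, title)]

def build_initial_stack_for_page_one (events_by_page : List (Int × List (Int × String))) (page_count : Int) : List (Int × String) :=
  (PySem.Dict.getD (PySem.Dict.mk events_by_page) (1 : Int) []).foldl (fun stack (e : Int × String) => apply_toc_to_stack stack e.1 e.2) []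

-- ===== PORT B =====
-- one step of Source B's loop body: state = (min_so_far, survivors)
def pvScanStep (st : Option Int × List (Int × String)) (e : Int × String) : Option Int × List (Int × String) :=
  match st.1 with
  | none => (some e.1, st.2 ++ [e])
  | some v => if e.1 < v then (some e.1, st.2 ++ [e]) else (some v, st.2)

def build_initial_stack_for_page_one_alt (events_by_page : List (Int × List (Int × String))) (page_count : Int) : List (Int × String) :=
  (((PySem.Dict.getD (PySem.Dict.mk events_by_page) (1 : Int) []).reverse.foldl pvScanStep (none, [])).2).reverse

-- ===== PRECONDITION & SPEC =====
def Spec_build_initial_stack_for_page_one (events_by_page : List (Int × List (Int × String))) (page_count : Int) (out : List (Int × String)) : Prop := out = build_initial_stack_for_page_one_alt events_by_page page_count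
instance (events_by_page : List (Int × List (Int × String))) (page_count : Int) (out : List (Int × String)) : Decidable (Spec_build_initial_stack_for_page_one events_by_page page_count out) := by unfold Spec_build_initial_stack_for_page_one; infer_instance

-- ===== CLAIM (what is proved, stated in full; the proofs are below) =====
def Claim_equal_build_initial_stack_for_page_one : Prop := ∀ (events_by_page : List (Int × List (Int × String))) (page_count : Int), Dom_build_initial_stack_for_page_one events_by_page page_count → Spec_build_initial_stack_for_page_one events_by_page page_count (build_initial_stack_for_page_one events_by_page page_count)

-- ===== LEMMAS AND PROOFS =====

-- A's fold and B's scan on a bare event list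
def pvA (es : List (Int × String)) : List (Int × String) :=
  es.foldl (fun stack (e : Int × String) => apply_toc_to_stack stack e.1 e.2) []

def pvB (es : List (Int × String)) : List (Int × String) :=
  ((es.reverse.foldl pvScanStep (none, [])).2).reverse

theorem pvWhilePop_nil (l : Int) : pvWhilePop [] l = [] := by
  rw [pvWhilePop]
  split
  · rename_i top hs
    simp at hs
  · rfl

theorem pvWhilePop_concat_ge (s : List (Int × String)) (x : Int × String) (l : Int)
    (h : l ≤ x.1) : pvWhilePop (s ++ [x]) l = pvWhilePop s l := by
  rw [pvWhilePop]
  split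
  · rename_i top hs
    rw [List.getLast?_concat] at hs
    injection hs with hs
    subst hs
    rw [if_pos h, List.dropLast_concat]
  · rename_i hs
    rw [List.getLast?_concat] at hs
    exact absurd hs (by simp)

theorem pvWhilePop_concat_lt (s : List (Int × String)) (x : Int × String) (l : Int)
    (h : x.1 < l) : pvWhilePop (s ++ [x]) l = s ++ [x] := by
  rw [pvWhilePop]
  split
  · rename_i top hs
    rw [List.getLast?_concat] at hs
    injection hs with hs
    subst hs
    rw [if_neg (not_le.mpr h)]
  · rfl

theorem pvWhilePop_all_lt (s : List (Int × String)) (l : Int)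
    (h : ∀ x ∈ s, x.1 < l) : pvWhilePop s l = s := by
  induction s using List.reverseRecOn with
  | nil => exact pvWhilePop_nil l
  | append_singleton s' x _ =>
    exact pvWhilePop_concat_lt s' x l (h x (by simp))

theorem pvWhilePop_mid_ge (t : List (Int × String)) :
    ∀ (s : List (Int × String)) (e : Int × String) (l : Int),
    (∀ x ∈ t, l ≤ x.1) → l ≤ e.1 → pvWhilePop (s ++ e :: t) l = pvWhilePop s l := by
  induction t using List.reverseRecOn with
  | nil => intro s e l _ he; exact pvWhilePop_concat_ge s e l he
  | append_singleton t' x ih =>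
    intro s e l ht he
    have hsplit : s ++ e :: (t' ++ [x]) = (s ++ e :: t') ++ [x] := by simp
    rw [hsplit, pvWhilePop_concat_ge _ x l (ht x (by simp))]
    exact ih s e l (fun y hy => ht y (by simp [hy])) he

theorem pv_apply_nil (e : Int × String) :
    apply_toc_to_stack [] e.1 e.2 = [] ++ [e] := by
  unfold apply_toc_to_stack
  rw [pvWhilePop_nil]

-- invariant crux: processing es on a stack ending with e (everything below e strictly smaller)
theorem pv_main (es : List (Int × String)) :
    ∀ (s : List (Int × String)) (e : Int × String),
    (∀ x ∈ s, x.1 < e.1) →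
    es.foldl (fun stack (y : Int × String) => apply_toc_to_stack stack y.1 y.2) (s ++ [e]) =
      if (∀ x ∈ es, e.1 < x.1) then
        s ++ e :: es.foldl (fun stack (y : Int × String) => apply_toc_to_stack stack y.1 y.2) []
      else es.foldl (fun stack (y : Int × String) => apply_toc_to_stack stack y.1 y.2) s := by
  induction es with
  | nil => intro s e _; simp
  | cons y rest ih =>
    intro s e hs
    by_cases hy : e.1 < y.1
    · have hse : ∀ x ∈ s ++ [e], x.1 < y.1 := by
        intro x hx
        rcases List.mem_append.mp hx with h1 | h1
        · exact lt_trans (hs x h1) hy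
        · simp at h1; subst h1; exact hy
      have hstep : apply_toc_to_stack (s ++ [e]) y.1 y.2 = (s ++ [e]) ++ [y] := by
        unfold apply_toc_to_stack
        rw [pvWhilePop_all_lt _ _ hse]
      simp only [List.foldl_cons, hstep]
      rw [ih (s ++ [e]) y hse]
      by_cases hr : ∀ x ∈ rest, y.1 < x.1
      · have hall : ∀ x ∈ y :: rest, e.1 < x.1 := by
          intro x hx
          rcases List.mem_cons.mp hx with h1 | h1
          · subst h1; exact hy
          · exact lt_trans hy (hr x h1)
        rw [if_pos hr, if_pos hall]
        rw [pv_apply_nil y, ih [] y (by simp), if_pos hr]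
        simp
      · have hall : (∀ x ∈ y :: rest, e.1 < x.1) ↔ (∀ x ∈ rest, e.1 < x.1) := by
          constructor
          · intro h x hx
            exact h x (List.mem_cons.mpr (Or.inr hx))
          · intro h x hx
            rcases List.mem_cons.mp hx with h1 | h1
            · subst h1; exact hy
            · exact h x h1
        rw [if_neg hr, ih s e hs]
        by_cases hre : ∀ x ∈ rest, e.1 < x.1
        · rw [if_pos hre, if_pos (hall.mpr hre)]
          rw [pv_apply_nil y, ih [] y (by simp), if_neg hr]
        · rw [if_neg hre, if_neg (fun h => hre (hall.mp h))]
          have hstep2 : apply_toc_to_stack s y.1 y.2 = s ++ [y] := by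
            unfold apply_toc_to_stack
            rw [pvWhilePop_all_lt s y.1 (fun x hx => lt_trans (hs x hx) hy)]
          rw [hstep2, ih s y (fun x hx => lt_trans (hs x hx) hy), if_neg hr]
    · -- y.1 ≤ e.1 : y pops e immediately
      have hy' : y.1 ≤ e.1 := not_lt.mp hy
      have hstep : apply_toc_to_stack (s ++ [e]) y.1 y.2 = apply_toc_to_stack s y.1 y.2 := by
        unfold apply_toc_to_stack
        rw [show s ++ [e] = s ++ e :: [] from rfl,
            pvWhilePop_mid_ge [] s e y.1 (by simp) hy']
      have hnall : ¬ ∀ x ∈ y :: rest, e.1 < x.1 := by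
        intro h
        exact absurd (h y (List.mem_cons.mpr (Or.inl rfl))) (not_lt.mpr hy')
      simp only [List.foldl_cons, hstep, if_neg hnall]

theorem pvA_cons (e : Int × String) (es : List (Int × String)) :
    pvA (e :: es) = if (∀ x ∈ es, e.1 < x.1) then e :: pvA es else pvA es := by
  unfold pvA
  simp only [List.foldl_cons]
  rw [pv_apply_nil e, pv_main es [] e (by simp)]
  simp

-- running-minimum facts for B's scan
def pvOk (m : Option Int) (e : Int) : Prop :=
  match m with
  | none => True
  | some v => e < v

theorem pv_fst_spec (r : List (Int × String)) :
    ∀ (m : Option Int) (acc : List (Int × String)) (e : Int),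
    pvOk ((r.foldl pvScanStep (m, acc)).1) e ↔ (pvOk m e ∧ ∀ x ∈ r, e < x.1) := by
  induction r with
  | nil => intro m acc e; simp
  | cons y rest ih =>
    intro m acc e
    cases m with
    | none =>
      simp only [List.foldl_cons, pvScanStep]
      rw [ih]
      simp only [pvOk]
      constructor
      · rintro ⟨h1, h2⟩
        refine ⟨trivial, fun x hx => ?_⟩
        rcases List.mem_cons.mp hx with h | h
        · subst h; exact h1
        · exact h2 x h
      · rintro ⟨-, h2⟩
        exact ⟨h2 y (List.mem_cons.mpr (Or.inl rfl)),
               fun x hx => h2 x (List.mem_cons.mpr (Or.inr hx))⟩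
    | some v =>
      by_cases hv : y.1 < v
      · simp only [List.foldl_cons, pvScanStep, if_pos hv]
        rw [ih]
        simp only [pvOk]
        constructor
        · rintro ⟨h1, h2⟩
          refine ⟨lt_trans h1 hv, fun x hx => ?_⟩
          rcases List.mem_cons.mp hx with h | h
          · subst h; exact h1
          · exact h2 x h
        · rintro ⟨h1, h2⟩
          exact ⟨h2 y (List.mem_cons.mpr (Or.inl rfl)),
                 fun x hx => h2 x (List.mem_cons.mpr (Or.inr hx))⟩
      · simp only [List.foldl_cons, pvScanStep, if_neg hv]
        rw [ih]
        simp only [pvOk]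
        have hv' : v ≤ y.1 := not_lt.mp hv
        constructor
        · rintro ⟨h1, h2⟩
          refine ⟨h1, fun x hx => ?_⟩
          rcases List.mem_cons.mp hx with h | h
          · subst h; exact lt_of_lt_of_le h1 hv'
          · exact h2 x h
        · rintro ⟨h1, h2⟩
          exact ⟨h1, fun x hx => h2 x (List.mem_cons.mpr (Or.inr hx))⟩

theorem pvB_cons (e : Int × String) (es : List (Int × String)) :
    pvB (e :: es) = if (∀ x ∈ es, e.1 < x.1) then e :: pvB es else pvB es := by
  unfold pvB
  rw [List.reverse_cons, List.foldl_concat]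
  set q := es.reverse.foldl pvScanStep (none, ([] : List (Int × String))) with hq
  have hmem : pvOk q.1 e.1 ↔ ∀ x ∈ es, e.1 < x.1 := by
    rw [hq, pv_fst_spec]
    simp only [pvOk, true_and]
    constructor
    · intro h x hx; exact h x (List.mem_reverse.mpr hx)
    · intro h x hx; exact h x (List.mem_reverse.mp hx)
  by_cases hc : ∀ x ∈ es, e.1 < x.1
  · have hok : pvOk q.1 e.1 := hmem.mpr hc
    rw [if_pos hc]
    cases hq1 : q.1 with
    | none => simp [pvScanStep, hq1]
    | some v =>
      have hlt : e.1 < v := by rw [hq1] at hok; exact hok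
      simp [pvScanStep, hq1, hlt]
  · have hok : ¬ pvOk q.1 e.1 := fun h => hc (hmem.mp h)
    rw [if_neg hc]
    cases hq1 : q.1 with
    | none => exact absurd (by rw [hq1]; trivial) hok
    | some v =>
      have hnlt : ¬ e.1 < v := by intro h; exact hok (by rw [hq1]; exact h)
      simp [pvScanStep, hq1, hnlt]

theorem pvA_eq_pvB (es : List (Int × String)) : pvA es = pvB es := by
  induction es with
  | nil => rfl
  | cons e rest ih =>
    rw [pvA_cons, pvB_cons, ih]

-- ===== VERDICT (by name: the statement is the Claim_ definition above) =====
theorem build_initial_stack_for_page_one_spec : Claim_equal_build_initial_stack_for_page_one := by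
  intro events_by_page page_count _
  show build_initial_stack_for_page_one events_by_page page_count =
    build_initial_stack_for_page_one_alt events_by_page page_count
  exact pvA_eq_pvB (PySem.Dict.getD (PySem.Dict.mk events_by_page) (1 : Int) [])
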